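-- pv_equiv track=rewrite | github.com/szaross/WDI | Zestaw_7/t_15.py | more_ones
-- ===== SOURCE A (Python) =====
-- def more_ones(a):
--     ones,twos=0,0
--     while a>0:
--         if a%3==1:
--             ones+=1
--         elif a%3==2:
--             twos+=1
--         a//=3
--     return ones>twos
-- ===== SOURCE B (Python) =====
-- # Net (ones minus twos) contribution of the two base-3 digits of each residue mod 9.
-- _NET = [0, 1, -1, 1, 2, 0, -1, 0, -2]
--
-- def more_ones(a):
--     d = 0
--     while a > 0:
--         a, r = divmod(a, 9)
--         d += _NET[r]
--     return d > 0
-- ===== Notes on version B (the rewrite author's own statement) =====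
-- stated objective: alternative
-- what changed: Processes the number two ternary digits at a time (one base-nine chunk per iteration) with a precomputed nine-entry table of net ones-minus-twos contributions, accumulating a single signed difference instead of two counters over single base-3 digits.
import Mathlib
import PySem

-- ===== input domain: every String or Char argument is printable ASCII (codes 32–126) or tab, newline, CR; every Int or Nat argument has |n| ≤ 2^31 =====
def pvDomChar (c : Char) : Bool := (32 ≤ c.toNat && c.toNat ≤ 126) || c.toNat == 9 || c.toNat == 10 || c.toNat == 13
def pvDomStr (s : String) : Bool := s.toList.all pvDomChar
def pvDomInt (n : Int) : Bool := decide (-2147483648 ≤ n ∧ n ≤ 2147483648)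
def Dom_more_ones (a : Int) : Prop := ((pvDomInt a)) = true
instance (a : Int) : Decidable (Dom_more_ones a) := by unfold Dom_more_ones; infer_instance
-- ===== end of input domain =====

-- B walks the number in base-9 chunks, adding a table-lookup net ones-minus-twos per chunk; alternative decomposition, same result.


-- termination: a // 3 and a // 9 strictly shrink toNat for a > 0
theorem pvFloordiv3_lt (a : Int) (h : 0 < a) :
    (PySem.Int.floordiv a 3).toNat < a.toNat := by
  rw [PySem.Int.floordiv_eq_ediv_of_pos (by norm_num)]
  omega

theorem pvFloordiv9_lt (a : Int) (h : 0 < a) :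
    (PySem.Int.floordiv a 9).toNat < a.toNat := by
  rw [PySem.Int.floordiv_eq_ediv_of_pos (by norm_num)]
  omega

-- ===== PORT A =====
def more_ones_loop (a ones twos : Int) : Bool :=
  if h : a > 0 then
    if PySem.Int.mod a 3 = 1 then
      more_ones_loop (PySem.Int.floordiv a 3) (ones + 1) twos
    else if PySem.Int.mod a 3 = 2 then
      more_ones_loop (PySem.Int.floordiv a 3) ones (twos + 1)
    else
      more_ones_loop (PySem.Int.floordiv a 3) ones twos
  else
    decide (ones > twos)
termination_by a.toNat
decreasing_by all_goals exact pvFloordiv3_lt a h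

def more_ones (a : Int) : Bool := more_ones_loop a 0 0

-- ===== PORT B =====
-- the _NET table of Source B
def pvNET : List Int := [0, 1, -1, 1, 2, 0, -1, 0, -2]

-- Source B's while loop: a, r = divmod(a, 9); d += _NET[r].  The index r = a % 9 is
-- always in [0, 9), so _NET[r] never raises and pyGet? with .getD 0 is exact here.
def more_ones_alt_loop (a d : Int) : Bool :=
  if h : a > 0 then
    more_ones_alt_loop (PySem.Int.floordiv a 9)
      (d + (PySem.List.pyGet? pvNET (PySem.Int.mod a 9)).getD 0)
  else
    decide (d > 0)
termination_by a.toNat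
decreasing_by exact pvFloordiv9_lt a h

def more_ones_alt (a : Int) : Bool := more_ones_alt_loop a 0

-- ===== PRECONDITION & SPEC =====
def Spec_more_ones (a : Int) (out : Bool) : Prop := out = more_ones_alt a
instance (a : Int) (out : Bool) : Decidable (Spec_more_ones a out) := by unfold Spec_more_ones; infer_instance

-- ===== CLAIM (what is proved, stated in full; the proofs are below) =====
def Claim_equal_more_ones : Prop := ∀ (a : Int), Dom_more_ones a → Spec_more_ones a (more_ones a)

-- ===== LEMMAS AND PROOFS =====

-- net contribution of one base-3 digit
def pvF3 (d : Int) : Int := if d = 1 then 1 else if d = 2 then -1 else 0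

-- net ones-minus-twos over all base-3 digits of a
def pvNet3 (a : Int) : Int :=
  if h : a > 0 then pvF3 (a % 3) + pvNet3 (a / 3) else 0
termination_by a.toNat
decreasing_by omega

theorem pvNet3_step (a : Int) (ha : 0 ≤ a) :
    pvNet3 a = pvF3 (a % 3) + pvNet3 (a / 3) := by
  by_cases h : a > 0
  · rw [pvNet3]; simp [h]
  · have ha0 : a = 0 := by omega
    subst ha0
    rw [pvNet3]
    simp [pvF3, pvNet3]

theorem more_ones_loop_eq (n : Nat) : ∀ (a ones twos : Int), a.toNat ≤ n →
    more_ones_loop a ones twos = decide (ones - twos + pvNet3 a > 0) := by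
  induction n with
  | zero =>
    intro a ones twos hle
    have ha : ¬ a > 0 := by omega
    rw [more_ones_loop, pvNet3]
    simp [ha]
  | succ n ih =>
    intro a ones twos hle
    by_cases ha : a > 0
    · have hstep : pvNet3 a = pvF3 (a % 3) + pvNet3 (a / 3) := pvNet3_step a (by omega)
      have hrec : (PySem.Int.floordiv a 3).toNat ≤ n := by
        have := pvFloordiv3_lt a ha; omega
      have hm : PySem.Int.mod a 3 = a % 3 := PySem.Int.mod_eq_emod_of_pos (by norm_num)
      have hf : PySem.Int.floordiv a 3 = a / 3 := PySem.Int.floordiv_eq_ediv_of_pos (by norm_num)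
      rw [more_ones_loop]
      simp only [ha, dite_true, hm, hf]
      by_cases h1 : a % 3 = 1
      · rw [if_pos h1, ih _ _ _ (hf ▸ hrec), hstep, h1]
        simp [pvF3, decide_eq_decide]
        omega
      · rw [if_neg h1]
        by_cases h2 : a % 3 = 2
        · rw [if_pos h2, ih _ _ _ (hf ▸ hrec), hstep, h2]
          simp [pvF3, decide_eq_decide]
          omega
        · rw [if_neg h2, ih _ _ _ (hf ▸ hrec), hstep]
          have h0 : a % 3 = 0 := by omega
          rw [h0]
          simp [pvF3]
    · rw [more_ones_loop, pvNet3]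
      simp [ha]

-- the table entry at a % 9 is the net of the two low base-3 digits
theorem pvNET_lookup (a : Int) (ha : 0 < a) :
    (PySem.List.pyGet? pvNET (PySem.Int.mod a 9)).getD 0
      = pvF3 (a % 3) + pvF3 (a / 3 % 3) := by
  have hm : PySem.Int.mod a 9 = a % 9 := PySem.Int.mod_eq_emod_of_pos (by norm_num)
  have h3 : a % 3 = a % 9 % 3 := by omega
  have h33 : a / 3 % 3 = a % 9 / 3 := by omega
  rw [hm, h3, h33]
  have hr : 0 ≤ a % 9 ∧ a % 9 < 9 := ⟨Int.emod_nonneg a (by norm_num), Int.emod_lt_of_pos a (by norm_num)⟩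
  set r := a % 9 with hrdef
  clear_value r
  obtain ⟨hr0, hr9⟩ := hr
  interval_cases r <;> decide

theorem more_ones_alt_loop_eq (n : Nat) : ∀ (a d : Int), a.toNat ≤ n →
    more_ones_alt_loop a d = decide (d + pvNet3 a > 0) := by
  induction n with
  | zero =>
    intro a d hle
    have ha : ¬ a > 0 := by omega
    rw [more_ones_alt_loop, pvNet3]
    simp [ha]
  | succ n ih =>
    intro a d hle
    by_cases ha : a > 0
    · have hf : PySem.Int.floordiv a 9 = a / 9 := PySem.Int.floordiv_eq_ediv_of_pos (by norm_num)
      have hrec : (a / 9).toNat ≤ n := by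
        have := pvFloordiv9_lt a ha
        rw [hf] at this; omega
      have hstep2 : pvNet3 a = pvF3 (a % 3) + pvF3 (a / 3 % 3) + pvNet3 (a / 9) := by
        rw [pvNet3_step a (by omega), pvNet3_step (a / 3) (Int.ediv_nonneg (by omega) (by norm_num))]
        have : a / 3 / 3 = a / 9 := by omega
        rw [this]; ring
      rw [more_ones_alt_loop]
      simp only [ha, dite_true, hf]
      rw [ih _ _ hrec, pvNET_lookup a ha, hstep2, decide_eq_decide]
      constructor <;> intro <;> omega
    · rw [more_ones_alt_loop, pvNet3]
      simp [ha]

-- ===== VERDICT (by name: the statement is the Claim_ definition above) =====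
theorem more_ones_spec : Claim_equal_more_ones := by
  intro a _
  unfold Spec_more_ones more_ones more_ones_alt
  rw [more_ones_loop_eq a.toNat a 0 0 le_rfl, more_ones_alt_loop_eq a.toNat a 0 le_rfl]
  simp
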